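-- pv_equiv track=rewrite | github.com/developer388/Pattern-wise-coding-problems | 08 Recursion/N-ary-Recursion-Tree/question01.py | solution
-- ===== SOURCE A (Python) =====
-- def solution(input_digits, digit_mapping, sub_array, result, index):
--
-- 	if index == len(input_digits):
-- 		result.append(list(sub_array))
-- 		return result
--
--
-- 	characters = digit_mapping[input_digits[index]]
--
--
-- 	for i in range(len(characters)):
-- 		sub_array.append(characters[i])
-- 		solution(input_digits, digit_mapping, sub_array, result, index+1)
-- 		sub_array.pop()
--
-- 	return result
-- ===== SOURCE B (Python) =====
-- def solution(input_digits, digit_mapping, sub_array, result, index):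
--     # Return-value equivalent to A; like A it mutates `result` (extend vs repeated append)
--     # but unlike A it never touches `sub_array` (A appends/pops, net unchanged).
--     partials = [list(sub_array)]
--     for d in range(index, len(input_digits)):
--         partials = [p + [c] for p in partials for c in digit_mapping[input_digits[d]]]
--     result.extend(partials)
--     return result
-- ===== Notes on version B (the rewrite author's own statement) =====
-- stated objective: alternative
-- what changed: Replaced the recursive backtracking DFS (append/recurse/pop on a shared sub_array) by an iterative breadth-first frontier: a list of partial combinations is expanded once per digit position with a comprehension, then appended to result in one extend.
-- outside the precondition, e.g. on solution(['2', '9'], {'2': ''}, [], [], 0): A returns [], B returns []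
import Mathlib
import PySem

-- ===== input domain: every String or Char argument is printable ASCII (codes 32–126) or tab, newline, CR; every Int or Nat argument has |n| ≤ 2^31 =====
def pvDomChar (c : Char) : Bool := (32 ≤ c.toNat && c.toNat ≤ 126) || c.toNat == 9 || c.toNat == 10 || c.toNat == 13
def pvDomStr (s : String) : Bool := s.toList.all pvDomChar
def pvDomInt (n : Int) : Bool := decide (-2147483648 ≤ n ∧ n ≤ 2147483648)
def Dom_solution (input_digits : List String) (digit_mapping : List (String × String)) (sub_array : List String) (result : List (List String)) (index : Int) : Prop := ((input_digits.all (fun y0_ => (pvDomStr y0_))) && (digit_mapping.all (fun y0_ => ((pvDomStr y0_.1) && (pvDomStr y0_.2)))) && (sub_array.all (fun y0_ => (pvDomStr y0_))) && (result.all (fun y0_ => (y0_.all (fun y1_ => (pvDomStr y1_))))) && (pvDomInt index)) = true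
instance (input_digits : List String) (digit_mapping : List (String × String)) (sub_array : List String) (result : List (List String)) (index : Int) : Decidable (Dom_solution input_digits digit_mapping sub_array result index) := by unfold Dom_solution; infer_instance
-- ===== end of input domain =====

-- B replaces A's recursive DFS by an iterative frontier build (one pass over the digit
-- positions, expanding a list of partial combinations); return values agree — A also
-- mutates its `result`/`sub_array` arguments in place, B only extends `result`; the
-- equivalence proved here is about the RETURN value only.

-- Python dict lookup on the association list (first match); shared primitive, not a port.
def pvLookup (m : List (String × String)) (k : String) : Option String :=
  (m.find? (fun p => p.1 == k)).map (·.2)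

-- needed by the port's termination proof (cited in decreasing_by)
theorem pv_lt_of_pyGet?_some {α : Type} {xs : List α} {i : Int} {v : α}
    (h : PySem.List.pyGet? xs i = some v) : i < (xs.length : Int) := by
  by_contra hn
  have h0 : PySem.List.pyGet? xs i = none := by
    rw [PySem.List.pyGet?_eq_none_iff]
    simp [PySem.Raise.InRange]
    omega
  simp [h0] at h

-- ===== PORT A =====
mutual
-- A's body: base case appends a copy of sub_array; otherwise look up the characters
-- for the current digit (pyGet? none = IndexError, pvLookup none = KeyError: Python
-- raises there, excluded by Pre_) and run the for-loop over them.
def solutionGo (input_digits : List String) (digit_mapping : List (String × String)) (sub_array : List String) (result : List (List String)) (index : Int) : List (List String) :=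
  if index = (input_digits.length : Int) then
    result ++ [sub_array]
  else
    match h : PySem.List.pyGet? input_digits index with
    | none => result   -- Python raises IndexError here
    | some dg =>
      match pvLookup digit_mapping dg with
      | none => result -- Python raises KeyError here
      | some characters =>
        solutionFor input_digits digit_mapping sub_array result index
          (pv_lt_of_pyGet?_some h) characters.toList
termination_by (((input_digits.length : Int) - index).toNat, 1, 0)
decreasing_by
  · have := pv_lt_of_pyGet?_some h
    apply Prod.Lex.right
    exact Prod.Lex.left _ _ (by omega)

-- A's for-loop: sub_array.append(c); recurse with index+1 threading result; sub_array.pop()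
-- (so each call sees sub_array ++ [c] and sub_array itself is unchanged across iterations).
def solutionFor (input_digits : List String) (digit_mapping : List (String × String)) (sub_array : List String) (result : List (List String)) (index : Int) (hlt : index < (input_digits.length : Int)) (cs : List Char) : List (List String) :=
  match cs with
  | [] => result
  | c :: rest =>
      solutionFor input_digits digit_mapping sub_array
        (solutionGo input_digits digit_mapping (sub_array ++ [c.toString]) result (index + 1))
        index hlt rest
termination_by (((input_digits.length : Int) - index).toNat, 0, cs.length)
decreasing_by
  · apply Prod.Lex.left
    omega
  · apply Prod.Lex.right
    apply Prod.Lex.right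
    simp
end

def solution (input_digits : List String) (digit_mapping : List (String × String)) (sub_array : List String) (result : List (List String)) (index : Int) : List (List String) :=
  solutionGo input_digits digit_mapping sub_array result index

-- ===== PORT B =====
-- characters for digit position d: digit_mapping[input_digits[d]] ([] where Python raises,
-- which Pre_ excludes)
def altChars (input_digits : List String) (digit_mapping : List (String × String)) (d : Int) : List Char :=
  match (PySem.List.pyGet? input_digits d).bind (pvLookup digit_mapping) with
  | some cs => cs.toList
  | none => []

-- one step of the frontier build: [p + [c] for p in partials for c in digit_mapping[input_digits[d]]]
def altStep (input_digits : List String) (digit_mapping : List (String × String)) (partials : List (List String)) (d : Int) : List (List String) :=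
  partials.flatMap (fun p => (altChars input_digits digit_mapping d).map (fun c => p ++ [c.toString]))

def solution_alt (input_digits : List String) (digit_mapping : List (String × String)) (sub_array : List String) (result : List (List String)) (index : Int) : List (List String) :=
  let partials := (PySem.List.pyRange index (input_digits.length : Int) 1).foldl
    (altStep input_digits digit_mapping) [sub_array]
  result ++ partials

-- ===== PRECONDITION & SPEC =====
-- Pre_ excludes the inputs where Python A raises (index out of range: IndexError;
-- a digit missing from the mapping: KeyError); it requires every position from
-- index on to have a mapped digit, which also excludes a few inputs where an
-- early digit maps to the empty string so neither program ever reaches a later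
-- missing digit — both return `result` unchanged there.
def Pre_solution (input_digits : List String) (digit_mapping : List (String × String)) (sub_array : List String) (result : List (List String)) (index : Int) : Prop :=
  -(input_digits.length : Int) ≤ index ∧
  index ≤ (input_digits.length : Int) ∧
  ∀ d ∈ PySem.List.pyRange index (input_digits.length : Int) 1,
    ((PySem.List.pyGet? input_digits d).bind (pvLookup digit_mapping)).isSome = true
instance (input_digits : List String) (digit_mapping : List (String × String)) (sub_array : List String) (result : List (List String)) (index : Int) : Decidable (Pre_solution input_digits digit_mapping sub_array result index) := by unfold Pre_solution; infer_instance

def pvWitness_solution : List String × (List (String × String)) × List String × List (List String) × Int :=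
  (["2", "3"], [("2", "ab"), ("3", "c")], [], [], 0)

def Spec_solution (input_digits : List String) (digit_mapping : List (String × String)) (sub_array : List String) (result : List (List String)) (index : Int) (out : List (List String)) : Prop := out = solution_alt input_digits digit_mapping sub_array result index
instance (input_digits : List String) (digit_mapping : List (String × String)) (sub_array : List String) (result : List (List String)) (index : Int) (out : List (List String)) : Decidable (Spec_solution input_digits digit_mapping sub_array result index out) := by unfold Spec_solution; infer_instance

-- ===== CLAIM (what is proved, stated in full; the proofs are below) =====
def Claim_equal_solution : Prop := ∀ (input_digits : List String) (digit_mapping : List (String × String)) (sub_array : List String) (result : List (List String)) (index : Int), Dom_solution input_digits digit_mapping sub_array result index → Pre_solution input_digits digit_mapping sub_array result index → Spec_solution input_digits digit_mapping sub_array result index (solution input_digits digit_mapping sub_array result index)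
-- ===== LEMMAS AND PROOFS =====

-- B's frontier step distributes over ++ of frontiers.
lemma foldl_altStep_append (input_digits : List String) (digit_mapping : List (String × String)) (ds : List Int) :
    ∀ ps qs : List (List String),
      ds.foldl (altStep input_digits digit_mapping) (ps ++ qs)
        = ds.foldl (altStep input_digits digit_mapping) ps
          ++ ds.foldl (altStep input_digits digit_mapping) qs := by
  induction ds with
  | nil => intro ps qs; simp
  | cons d rest ih =>
      intro ps qs
      simp only [List.foldl_cons]
      rw [show altStep input_digits digit_mapping (ps ++ qs) d
            = altStep input_digits digit_mapping ps d ++ altStep input_digits digit_mapping qs d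
          from by simp [altStep], ih]

-- A frontier that is a map over characters splits into a flatMap of singleton frontiers.
lemma foldl_altStep_map (input_digits : List String) (digit_mapping : List (String × String))
    (g : Char → List String) (ds : List Int) :
    ∀ cs : List Char,
      ds.foldl (altStep input_digits digit_mapping) (cs.map g)
        = cs.flatMap (fun c => ds.foldl (altStep input_digits digit_mapping) [g c]) := by
  intro cs
  induction cs with
  | nil =>
      simp only [List.map_nil, List.flatMap_nil]
      induction ds with
      | nil => rfl
      | cons d rest ih => simpa [altStep] using ih
  | cons c rest ih =>
      rw [List.map_cons, show (g c :: rest.map g) = [g c] ++ rest.map g from rfl,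
        foldl_altStep_append, ih, List.flatMap_cons]

-- A's for-loop is a left fold of the recursive call over the characters.
lemma solutionFor_eq_foldl (input_digits : List String) (digit_mapping : List (String × String))
    (sub_array : List String) (index : Int) (hlt : index < (input_digits.length : Int)) :
    ∀ (cs : List Char) (result : List (List String)),
      solutionFor input_digits digit_mapping sub_array result index hlt cs
        = cs.foldl (fun r c => solutionGo input_digits digit_mapping (sub_array ++ [c.toString]) r (index + 1)) result := by
  intro cs
  induction cs with
  | nil => intro result; simp [solutionFor]
  | cons c rest ih => intro result; simp [solutionFor, ih]

-- Main invariant: on inputs where every lookup from `index` on succeeds, A's recursion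
-- returns `result ++` B's frontier.
lemma solutionGo_eq_frontier (input_digits : List String) (digit_mapping : List (String × String)) :
    ∀ (n : Nat) (index : Int) (sub_array : List String) (result : List (List String)),
      (((input_digits.length : Int) - index).toNat = n) →
      index ≤ (input_digits.length : Int) →
      (∀ d ∈ PySem.List.pyRange index (input_digits.length : Int) 1,
        ((PySem.List.pyGet? input_digits d).bind (pvLookup digit_mapping)).isSome = true) →
      solutionGo input_digits digit_mapping sub_array result index
        = result ++ (PySem.List.pyRange index (input_digits.length : Int) 1).foldl
            (altStep input_digits digit_mapping) [sub_array] := by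
  intro n
  induction n with
  | zero =>
      intro index sub_array result hn hle _
      have hidx : index = (input_digits.length : Int) := by omega
      rw [solutionGo, if_pos hidx, hidx,
        PySem.List.pyRange_one_eq_nil (le_refl _)]
      rfl
  | succ m ih =>
      intro index sub_array result hn hle hok
      have hlt : index < (input_digits.length : Int) := by omega
      have hmem : index ∈ PySem.List.pyRange index (input_digits.length : Int) 1 := by
        rw [PySem.List.mem_pyRange_one]; omega
      have hsome := hok index hmem
      -- unfold A one step
      rw [solutionGo]
      rw [if_neg (by omega)]
      split
      · next hnone => rw [hnone] at hsome; simp at hsome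
      · next dg hdg =>
        split
        · next hnone => rw [hdg] at hsome; simp [hnone] at hsome
        · next cs hcs =>
          have hchars : altChars input_digits digit_mapping index = cs.toList := by
            simp [altChars, hdg, hcs]
          rw [solutionFor_eq_foldl]
          -- rewrite the recursive calls with the induction hypothesis
          have hIH : ∀ (c : Char) (r : List (List String)),
              solutionGo input_digits digit_mapping (sub_array ++ [c.toString]) r (index + 1)
                = r ++ (PySem.List.pyRange (index + 1) (input_digits.length : Int) 1).foldl
                    (altStep input_digits digit_mapping) [sub_array ++ [c.toString]] := by
            intro c r
            apply ih (index + 1) _ r (by omega) (by omega)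
            intro d hd
            apply hok
            rw [PySem.List.mem_pyRange_one] at hd ⊢
            omega
          rw [List.foldl_ext _ _ result (fun r c _ => hIH c r)]
          rw [PySem.List.foldl_append_eq_flatMap]
          -- now the B side
          rw [PySem.List.pyRange_one_cons hlt, List.foldl_cons,
            show altStep input_digits digit_mapping [sub_array] index
                = cs.toList.map (fun c => sub_array ++ [c.toString]) from by
              simp [altStep, hchars],
            foldl_altStep_map]

-- ===== VERDICT (by name: the statement is the Claim_ definition above) =====
theorem solution_spec : Claim_equal_solution := by
  intro input_digits digit_mapping sub_array result index _ hpre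
  unfold Spec_solution solution solution_alt
  exact solutionGo_eq_frontier input_digits digit_mapping _ index sub_array result rfl hpre.2.1 hpre.2.2
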